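-- pv_equiv track=rewrite | github.com/ManonMars12/L3-INFO | atelier_3_ex_4.py | mot_optimaux
-- ===== SOURCE A (Python) =====
-- def mots_Nlettres(lst_mots:list, n:int)->list:
--     """
--     Créer une liste avec les mots de n lettres présents dans la liste placée en argument
--     Arg : lst_mots->list
--           n:int
--     Return res-> list
--     """
--     res=[]
--     for i in range(len(lst_mots)):
--         liste_detail=list(lst_mots[i])
--         if len(liste_detail)==n:
--             res.append(lst_mots[i])
--     return(res)
--
-- def mot_possible(mot:str, lettres:str)->bool:
--     liste_mot=list(mot)
--     liste_lettres=list(lettres)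
--     for e in liste_mot:
--         if e not in liste_lettres :
--             return(False)
--         else :
--             liste_lettres.remove(e)
--     return(True)
--
-- def mot_optimaux(dico:list, lettres:str)->list:
--     """
--     Créer une liste avec les mots optimaux qui pourraient être joués
--     Arg : dico->list
--     lettres:list
--     Return res-> list
--     """
--
--     res_total=[]
--     liste_lettres=list(lettres)
--     len_max=0
--
--     for i in range(len(liste_lettres)):
--         liste_mot_n_lettres=mots_Nlettres(dico, len(liste_lettres)-i)
--         for e in liste_mot_n_lettres :
--             if mot_possible(e,lettres):
--                 res_total.append(e)
--
--     for e in res_total :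
--         mot_courant=list(e)
--         if len(mot_courant)>len_max:
--             len_max=len(mot_courant)
--
--     res_opti=[mot for mot in res_total if len(mot)==len_max] #Liste en compréhension : on rajoute l'élément de res_total si sa len est maximale et cela boucle sur tout les mots de res_total
--     return(res_opti)
-- ===== SOURCE B (Python) =====
-- def mot_optimaux(dico: list, lettres: str) -> list:
--     # Single pass over dico: keep a running best length and the words achieving it.
--     lst = list(lettres)
--     best = 0
--     res = []
--     for mot in dico:
--         n = len(mot)
--         if n == 0 or n < best:
--             continue
--         m = list(mot)
--         if all(m.count(c) <= lst.count(c) for c in m):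
--             if n > best:
--                 best = n
--                 res = [mot]
--             else:
--                 res.append(mot)
--     return res
-- ===== Notes on version B (the rewrite author's own statement) =====
-- stated objective: faster
-- what changed: B makes a single pass over the dictionary with a running best-length and result list (count-based playability test), instead of A's one filtering pass over the whole dictionary per candidate length followed by a separate max pass and a final comprehension.
import Mathlib
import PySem

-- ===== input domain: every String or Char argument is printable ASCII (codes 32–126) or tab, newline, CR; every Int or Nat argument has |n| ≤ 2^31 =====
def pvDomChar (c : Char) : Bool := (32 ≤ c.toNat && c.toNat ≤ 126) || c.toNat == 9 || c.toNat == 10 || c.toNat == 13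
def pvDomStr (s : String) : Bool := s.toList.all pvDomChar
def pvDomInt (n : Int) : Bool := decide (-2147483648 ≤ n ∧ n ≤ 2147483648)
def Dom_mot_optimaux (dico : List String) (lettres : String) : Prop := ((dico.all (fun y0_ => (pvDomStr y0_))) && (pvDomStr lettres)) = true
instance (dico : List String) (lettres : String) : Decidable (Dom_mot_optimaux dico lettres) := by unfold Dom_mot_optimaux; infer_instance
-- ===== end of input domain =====

-- B replaces A's len(lettres) filtering passes over the whole dictionary (one per candidate
-- length) by a single pass tracking the best length so far, and replaces the destructive
-- remove-based letter check by a letter-count comparison; same return value.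

-- ===== PORT A =====
-- 'for i in range(len(lst_mots)): … lst_mots[i]' is a left-to-right pass over the list
def mots_Nlettres (lst_mots : List String) (n : Int) : List String :=
  lst_mots.foldl (fun res w =>
    if ((w.toList.length : Int) = n) then res ++ [w] else res) []

-- Python's list.remove removes the FIRST occurrence; membership was just checked, so it is
-- exactly List.erase here (PySem.List.remove?_eq_some_erase).
def mot_possible_aux : List Char → List Char → Bool
  | [], _ => true
  | e :: rest, liste_lettres =>
    if e ∈ liste_lettres then mot_possible_aux rest (liste_lettres.erase e)
    else false

def mot_possible (mot : String) (lettres : String) : Bool :=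
  mot_possible_aux mot.toList lettres.toList

def mot_optimaux (dico : List String) (lettres : String) : List String :=
  let liste_lettres := lettres.toList
  let res_total := (PySem.List.pyRange 0 (liste_lettres.length : Int) 1).foldl
    (fun res_total i =>
      (mots_Nlettres dico ((liste_lettres.length : Int) - i)).foldl
        (fun acc e => if mot_possible e lettres then acc ++ [e] else acc) res_total) []
  let len_max := res_total.foldl
    (fun len_max e => if e.toList.length > len_max then e.toList.length else len_max) 0
  res_total.filter (fun mot => mot.toList.length = len_max)

-- ===== PORT B =====
-- the body of B's single loop over dico (state: best length so far, words achieving it)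
def stepB (lst : List Char) (st : Nat × List String) (mot : String) : Nat × List String :=
  let n := mot.toList.length
  if n = 0 ∨ n < st.1 then st
  else
    let m := mot.toList
    if m.all (fun c => m.count c ≤ lst.count c) then
      if n > st.1 then (n, [mot]) else (st.1, st.2 ++ [mot])
    else st

def mot_optimaux_alt (dico : List String) (lettres : String) : List String :=
  let lst := lettres.toList
  (dico.foldl (stepB lst) (0, ([] : List String))).2

-- ===== PRECONDITION & SPEC =====
def Spec_mot_optimaux (dico : List String) (lettres : String) (out : List String) : Prop := out = mot_optimaux_alt dico lettres
instance (dico : List String) (lettres : String) (out : List String) : Decidable (Spec_mot_optimaux dico lettres out) := by unfold Spec_mot_optimaux; infer_instance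

-- ===== CLAIM (what is proved, stated in full; the proofs are below) =====
def Claim_equal_mot_optimaux : Prop := ∀ (dico : List String) (lettres : String), Dom_mot_optimaux dico lettres → Spec_mot_optimaux dico lettres (mot_optimaux dico lettres)

-- ===== LEMMAS AND PROOFS =====

-- "every letter of m is available in lst, with multiplicity"
def countLe (m lst : List Char) : Prop := ∀ c, m.count c ≤ lst.count c

-- the word predicate both programs agree on: nonempty and playable
def okf (lst : List Char) (w : String) : Bool :=
  !w.toList.isEmpty && w.toList.all (fun c => w.toList.count c ≤ lst.count c)

-- maximum length over the ok words of dico (0 if none)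
def bigM (lst : List Char) (dico : List String) : Nat :=
  dico.foldl (fun b w => if okf lst w then max b w.toList.length else b) 0

-- A's res_total, written as one flatMap
def resT (dico : List String) (lettres : String) : List String :=
  (PySem.List.pyRange 0 (lettres.toList.length : Int) 1).flatMap
    (fun i => dico.filter
      (fun w => mot_possible w lettres && decide ((w.toList.length : Int) = (lettres.toList.length : Int) - i)))

lemma poss_aux_iff (m : List Char) : ∀ rem, mot_possible_aux m rem = true ↔ countLe m rem := by
  induction m with
  | nil => intro rem; simp [mot_possible_aux, countLe]
  | cons e rest ih =>
    intro rem
    rw [mot_possible_aux]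
    by_cases he : e ∈ rem
    · rw [if_pos he, ih]
      have h1 : 1 ≤ rem.count e := List.one_le_count_iff.mpr he
      constructor
      · intro h c
        have hc := h c
        by_cases hce : c = e
        · subst hce
          rw [List.count_erase_self] at hc
          rw [List.count_cons_self]; omega
        · have hec : ¬(e = c) := fun hh => hce hh.symm
          rw [List.count_erase_of_ne hce] at hc
          simp [hec]; omega
      · intro h c
        have hc := h c
        by_cases hce : c = e
        · subst hce
          rw [List.count_erase_self]
          rw [List.count_cons_self] at hc; omega
        · have hec : ¬(e = c) := fun hh => hce hh.symm
          rw [List.count_erase_of_ne hce]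
          simp [hec] at hc; omega
    · rw [if_neg he]
      simp only [Bool.false_eq_true, false_iff, countLe, not_forall]
      refine ⟨e, ?_⟩
      rw [List.count_eq_zero.mpr he, List.count_cons_self]
      omega

lemma all_count_iff (m lst : List Char) :
    (m.all (fun c => m.count c ≤ lst.count c)) = true ↔ countLe m lst := by
  rw [List.all_eq_true]
  constructor
  · intro h c
    by_cases hc : c ∈ m
    · simpa using h c hc
    · simp [List.count_eq_zero.mpr hc]
  · intro h c _; simpa using h c

lemma countLe_length {m lst : List Char} (h : countLe m lst) : m.length ≤ lst.length := by
  have hsp : m.Subperm lst := List.subperm_ext_iff.mpr (fun x _ => h x)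
  exact hsp.length_le

lemma okf_iff (lst : List Char) (w : String) :
    okf lst w = true ↔ (w.toList.length ≠ 0 ∧ countLe w.toList lst) := by
  rw [okf, Bool.and_eq_true, all_count_iff]
  simp

lemma okf_eq_all (lst : List Char) (w : String) (hn : w.toList.length ≠ 0) :
    okf lst w = (w.toList.all (fun c => w.toList.count c ≤ lst.count c)) := by
  have h : w.toList.isEmpty = false := by
    simp; intro h; exact hn (by simp [h])
  simp [okf, h]

lemma bigM_append (lst : List Char) (pre : List String) (w : String) :
    bigM lst (pre ++ [w]) = if okf lst w then max (bigM lst pre) w.toList.length else bigM lst pre := by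
  simp [bigM, List.foldl_append]

lemma mem_le_bigM (lst : List Char) (dico : List String) {x : String}
    (hx : x ∈ dico) (hok : okf lst x = true) : x.toList.length ≤ bigM lst dico := by
  rw [bigM, PySem.List.foldl_if_eq_foldl_filter]
  exact (PySem.List.le_foldl_max_nat (dico.filter (okf lst)) (fun w => w.toList.length) 0).2 x
    (List.mem_filter.mpr ⟨hx, hok⟩)

lemma bigM_cases (lst : List Char) (dico : List String) :
    bigM lst dico = 0 ∨ ∃ x ∈ dico, okf lst x = true ∧ x.toList.length = bigM lst dico := by
  rw [bigM, PySem.List.foldl_if_eq_foldl_filter]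
  rw [show (List.foldl (fun b (w : String) => max b w.toList.length) 0 (dico.filter (okf lst)))
      = List.foldl max 0 ((dico.filter (okf lst)).map (fun w => w.toList.length)) from List.foldl_map.symm]
  rcases PySem.List.foldl_max_mem ((dico.filter (okf lst)).map (fun w => w.toList.length)) 0 with h | h
  · exact Or.inl h
  · right
    rcases List.mem_map.mp h with ⟨x, hx, hlen⟩
    rcases List.mem_filter.mp hx with ⟨hxd, hxok⟩
    exact ⟨x, hxd, hxok, hlen⟩

-- ===== B-side: the single pass computes (bigM, the ok words of maximal length) =====

lemma step_eq (lst : List Char) (pre : List String) (w : String) :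
    stepB lst
      (bigM lst pre, pre.filter (fun v => okf lst v && (v.toList.length == bigM lst pre))) w
    = (bigM lst (pre ++ [w]),
       (pre ++ [w]).filter (fun v => okf lst v && (v.toList.length == bigM lst (pre ++ [w])))) := by
  simp only [stepB]
  set b := bigM lst pre with hb
  set n := w.toList.length with hn
  by_cases h0 : n = 0 ∨ n < b
  · rw [if_pos h0]
    have hnok : okf lst w = true → n < b := by
      intro hok
      rcases h0 with h | h
      · exact absurd h ((okf_iff lst w).mp hok).1
      · exact h
    have hM : bigM lst (pre ++ [w]) = b := by
      rw [bigM_append]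
      by_cases hok : okf lst w = true
      · rw [if_pos hok]; have := hnok hok; omega
      · rw [if_neg hok]
    rw [hM]
    have hfw : (okf lst w && (w.toList.length == b)) = false := by
      by_cases hok : okf lst w = true
      · have := hnok hok
        rw [hok, Bool.true_and, beq_eq_false_iff_ne]; omega
      · rw [Bool.not_eq_true] at hok; rw [hok, Bool.false_and]
    rw [List.filter_append, List.filter_singleton, hfw]
    simp
  · rw [if_neg h0]
    push Not at h0
    obtain ⟨hn0, hbn⟩ := h0
    by_cases hcan : (w.toList.all (fun c => w.toList.count c ≤ lst.count c)) = true
    · rw [if_pos hcan]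
      have hok : okf lst w = true := by rw [okf_eq_all lst w hn0]; exact hcan
      have hM : bigM lst (pre ++ [w]) = max b n := by rw [bigM_append, if_pos hok]
      by_cases hgt : n > b
      · rw [if_pos hgt, hM]
        have hmax : max b n = n := by omega
        rw [hmax]
        have hpre : pre.filter (fun v => okf lst v && (v.toList.length == n)) = [] := by
          apply List.filter_eq_nil_iff.mpr
          intro v hv
          by_cases hvok : okf lst v = true
          · have := mem_le_bigM lst pre hv hvok
            simp only [hvok, Bool.true_and, ne_eq, beq_iff_eq]
            omega
          · rw [Bool.not_eq_true] at hvok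
            simp [hvok]
        rw [List.filter_append, hpre, List.filter_singleton]
        have hc : (okf lst w && (w.toList.length == n)) = true := by
          rw [hok, Bool.true_and, beq_iff_eq]
        rw [hc]
        simp
      · rw [if_neg hgt]
        have hbe : n = b := by omega
        have hmax : max b n = b := by omega
        rw [hM, hmax, List.filter_append, List.filter_singleton]
        have hc : (okf lst w && (w.toList.length == b)) = true := by
          rw [hok, Bool.true_and, beq_iff_eq]; omega
        rw [hc]
        simp
    · rw [if_neg hcan]
      have hok : okf lst w = false := by
        rw [okf_eq_all lst w hn0]; exact Bool.eq_false_iff.mpr hcan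
      have hM : bigM lst (pre ++ [w]) = b := by rw [bigM_append, if_neg (by simp [hok])]
      rw [hM, List.filter_append, List.filter_singleton]
      rw [show (okf lst w && (w.toList.length == b)) = false by rw [hok, Bool.false_and]]
      simp

lemma alt_fold (lst : List Char) (dico : List String) : ∀ pre : List String,
    dico.foldl (stepB lst)
      (bigM lst pre, pre.filter (fun v => okf lst v && (v.toList.length == bigM lst pre)))
    = (bigM lst (pre ++ dico),
       (pre ++ dico).filter (fun v => okf lst v && (v.toList.length == bigM lst (pre ++ dico)))) := by
  induction dico with
  | nil => intro pre; simp
  | cons w rest ih =>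
    intro pre
    rw [List.foldl_cons, step_eq, ih (pre ++ [w])]
    simp

lemma alt_eq (dico : List String) (lettres : String) :
    mot_optimaux_alt dico lettres
      = dico.filter (fun v => okf lettres.toList v && (v.toList.length == bigM lettres.toList dico)) := by
  simp only [mot_optimaux_alt]
  have h := alt_fold lettres.toList dico []
  simp only [List.nil_append] at h
  rw [show ((0 : Nat), ([] : List String))
      = (bigM lettres.toList [],
         ([] : List String).filter (fun v => okf lettres.toList v && (v.toList.length == bigM lettres.toList []))) from rfl,
      h]

-- ===== A-side: res_total, len_max and the final filter =====

lemma motsN_eq (dico : List String) (n : Int) :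
    mots_Nlettres dico n = dico.filter (fun w => decide ((w.toList.length : Int) = n)) := by
  rw [mots_Nlettres, PySem.List.foldl_append_ite_eq_filter]
  simp

lemma resT_spec (dico : List String) (lettres : String) :
    (PySem.List.pyRange 0 (lettres.toList.length : Int) 1).foldl
      (fun res_total i =>
        (mots_Nlettres dico ((lettres.toList.length : Int) - i)).foldl
          (fun acc e => if mot_possible e lettres then acc ++ [e] else acc) res_total) []
    = resT dico lettres := by
  have hfun : (fun (res_total : List String) (i : Int) =>
        (mots_Nlettres dico ((lettres.toList.length : Int) - i)).foldl
          (fun acc e => if mot_possible e lettres then acc ++ [e] else acc) res_total)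
      = (fun res_total i => res_total ++
          (dico.filter (fun w => mot_possible w lettres && decide ((w.toList.length : Int) = (lettres.toList.length : Int) - i)))) := by
    funext rt i
    rw [motsN_eq, PySem.List.foldl_append_if_eq_filter, List.filter_filter]
  rw [hfun, PySem.List.foldl_append_eq_flatMap]
  simp [resT]

lemma mem_resT (dico : List String) (lettres : String) (w : String) :
    w ∈ resT dico lettres ↔ w ∈ dico ∧ okf lettres.toList w = true := by
  rw [resT]
  simp only [List.mem_flatMap, List.mem_filter, PySem.List.mem_pyRange_one, Bool.and_eq_true,
    decide_eq_true_eq, mot_possible, poss_aux_iff, okf_iff]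
  constructor
  · rintro ⟨i, ⟨hi0, hiL⟩, hwd, hposs, hlen⟩
    exact ⟨hwd, by omega, hposs⟩
  · rintro ⟨hwd, hn0, hcnt⟩
    have hle : w.toList.length ≤ lettres.toList.length := countLe_length hcnt
    exact ⟨(lettres.toList.length : Int) - (w.toList.length : Int), by omega, hwd, hcnt, by omega⟩

lemma lenmax_eq (dico : List String) (lettres : String) :
    (resT dico lettres).foldl
      (fun len_max e => if e.toList.length > len_max then e.toList.length else len_max) 0
    = bigM lettres.toList dico := by
  have hfun : (fun (len_max : Nat) (e : String) => if e.toList.length > len_max then e.toList.length else len_max)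
      = (fun len_max e => max len_max e.toList.length) := by
    funext b e
    by_cases h : e.toList.length > b
    · rw [if_pos h, Nat.max_eq_right (le_of_lt h)]
    · rw [if_neg h, Nat.max_eq_left (by omega)]
  rw [hfun]
  rw [show (List.foldl (fun b (w : String) => max b w.toList.length) 0 (resT dico lettres))
      = List.foldl max 0 ((resT dico lettres).map (fun w => w.toList.length)) from List.foldl_map.symm]
  apply le_antisymm
  · rcases PySem.List.foldl_max_mem ((resT dico lettres).map (fun w => w.toList.length)) 0 with h | h
    · omega
    · rcases List.mem_map.mp h with ⟨x, hx, hlen⟩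
      rcases (mem_resT dico lettres x).mp hx with ⟨hxd, hxok⟩
      rw [← hlen]
      exact mem_le_bigM lettres.toList dico hxd hxok
  · rcases bigM_cases lettres.toList dico with h | h
    · omega
    · rcases h with ⟨x, hxd, hxok, hlen⟩
      rw [← hlen]
      exact (PySem.List.le_foldl_max _ _).2 _
        (List.mem_map.mpr ⟨x, (mem_resT dico lettres x).mpr ⟨hxd, hxok⟩, rfl⟩)

lemma final_filter (dico : List String) (lettres : String) :
    (resT dico lettres).filter (fun w => decide (w.toList.length = bigM lettres.toList dico))
    = dico.filter (fun w => okf lettres.toList w && (w.toList.length == bigM lettres.toList dico)) := by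
  set M := bigM lettres.toList dico with hM
  rcases bigM_cases lettres.toList dico with hM0 | ⟨x, hxd, hxok, hxlen⟩
  · rw [List.filter_eq_nil_iff.mpr, List.filter_eq_nil_iff.mpr]
    · intro w _
      by_cases hok : okf lettres.toList w = true
      · have := ((okf_iff lettres.toList w).mp hok).1
        simp only [hok, Bool.true_and, beq_iff_eq]
        omega
      · rw [Bool.not_eq_true] at hok; simp [hok]
    · intro w hw
      have hok := ((mem_resT dico lettres w).mp hw).2
      have := ((okf_iff lettres.toList w).mp hok).1
      simp only [decide_eq_true_eq]; omega
  · have hM1 : 1 ≤ M := by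
      have := ((okf_iff lettres.toList x).mp hxok).1; omega
    have hML : M ≤ lettres.toList.length := by
      have := countLe_length ((okf_iff lettres.toList x).mp hxok).2; omega
    set j : Int := (lettres.toList.length : Int) - (M : Int) with hj
    rw [resT, List.filter_flatMap]
    have hnil : ∀ i : Int, i ≠ j →
        List.filter (fun w => decide (w.toList.length = M))
          (List.filter (fun w => mot_possible w lettres && decide ((w.toList.length : Int) = (lettres.toList.length : Int) - i)) dico) = [] := by
      intro i hij
      rw [List.filter_filter, List.filter_eq_nil_iff]
      intro w _
      simp only [Bool.and_eq_true, decide_eq_true_eq, not_and]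
      intro hlen _
      omega
    rw [show PySem.List.pyRange 0 ((lettres.toList.length : Int)) 1
        = PySem.List.pyRange 0 j 1 ++ PySem.List.pyRange j (j + 1) 1 ++ PySem.List.pyRange (j + 1) ((lettres.toList.length : Int)) 1 by
      rw [← PySem.List.pyRange_one_append 0 j (j+1) (by omega) (by omega),
          ← PySem.List.pyRange_one_append 0 (j+1) ((lettres.toList.length : Int)) (by omega) (by omega)]]
    rw [List.flatMap_append, List.flatMap_append]
    have h1 : (PySem.List.pyRange 0 j 1).flatMap
        (fun i => List.filter (fun w => decide (w.toList.length = M))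
          (List.filter (fun w => mot_possible w lettres && decide ((w.toList.length : Int) = (lettres.toList.length : Int) - i)) dico)) = [] :=
      List.flatMap_eq_nil_iff.mpr (fun i hi => hnil i (by have := PySem.List.mem_pyRange_one.mp hi; omega))
    have h2 : (PySem.List.pyRange (j + 1) ((lettres.toList.length : Int)) 1).flatMap
        (fun i => List.filter (fun w => decide (w.toList.length = M))
          (List.filter (fun w => mot_possible w lettres && decide ((w.toList.length : Int) = (lettres.toList.length : Int) - i)) dico)) = [] :=
      List.flatMap_eq_nil_iff.mpr (fun i hi => hnil i (by have := PySem.List.mem_pyRange_one.mp hi; omega))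
    rw [h1, h2, PySem.List.pyRange_one_singleton]
    simp only [List.flatMap_cons, List.flatMap_nil, List.append_nil, List.nil_append]
    rw [List.filter_filter]
    apply List.filter_congr
    intro w _
    rw [Bool.eq_iff_iff]
    simp only [Bool.and_eq_true, decide_eq_true_eq, mot_possible, poss_aux_iff, okf_iff, beq_iff_eq]
    constructor
    · rintro ⟨hlenM, hcnt, hlen⟩
      exact ⟨⟨by omega, hcnt⟩, by omega⟩
    · rintro ⟨⟨hn0, hcnt⟩, hlenM⟩
      exact ⟨by omega, hcnt, by omega⟩

lemma a_eq (dico : List String) (lettres : String) :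
    mot_optimaux dico lettres
      = dico.filter (fun w => okf lettres.toList w && (w.toList.length == bigM lettres.toList dico)) := by
  simp only [mot_optimaux]
  rw [resT_spec, lenmax_eq]
  exact final_filter dico lettres

-- ===== VERDICT (by name: the statement is the Claim_ definition above) =====
theorem mot_optimaux_spec : Claim_equal_mot_optimaux := by
  intro dico lettres _
  unfold Spec_mot_optimaux
  rw [a_eq, alt_eq]
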